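-- pv_equiv track=rewrite | github.com/wakame-tech/kyopro | src/abc192/abc192_b/main.py | is_easy
-- ===== SOURCE A (Python) =====
-- def is_easy(s):
--     for i, c in enumerate(s):
--         if i % 2 == 0:
--             if not c.islower():
--                 return False
--         else:
--             if not c.isupper():
--                 return False
--
--     return True
-- ===== SOURCE B (Python) =====
-- def is_easy(s):
--     return all(c.islower() for c in s[::2]) and all(c.isupper() for c in s[1::2])
-- ===== Notes on version B (the rewrite author's own statement) =====
-- stated objective: idiomatic
-- what changed: Replaces the index-tracking loop with parity branch and early returns by two slice passes: every-other-character slices s[::2]/s[1::2] each checked with all() and a per-character case predicate.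
import Mathlib
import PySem

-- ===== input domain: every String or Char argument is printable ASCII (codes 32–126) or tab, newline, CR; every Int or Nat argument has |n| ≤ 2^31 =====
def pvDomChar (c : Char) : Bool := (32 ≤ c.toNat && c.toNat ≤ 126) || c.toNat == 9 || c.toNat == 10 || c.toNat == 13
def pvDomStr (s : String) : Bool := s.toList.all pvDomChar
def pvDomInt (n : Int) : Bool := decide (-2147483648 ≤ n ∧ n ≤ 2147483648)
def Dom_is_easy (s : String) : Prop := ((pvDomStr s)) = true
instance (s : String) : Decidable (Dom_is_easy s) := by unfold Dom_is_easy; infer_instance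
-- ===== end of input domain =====

-- B checks the even- and odd-index slices s[::2] / s[1::2] separately with all(); same cost, more idiomatic than A's indexed loop.

-- ===== PORT A =====
-- the 'for i, c in enumerate(s)' loop with its early 'return False's
def isEasyLoop : List (Int × Char) → Bool
  | [] => true
  | (i, c) :: rest =>
    if i % 2 == 0 then
      if !(PySem.Chars.islower c) then false else isEasyLoop rest
    else
      if !(PySem.Chars.isupper c) then false else isEasyLoop rest

def is_easy (s : String) : Bool :=
  isEasyLoop (PySem.List.enumerate s.toList 0)

-- ===== PORT B =====
-- all(c.islower() for c in s[::2]) and all(c.isupper() for c in s[1::2]); slice? with step ≠ 0 always returns some, so getD [] is never taken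
def is_easy_alt (s : String) : Bool :=
  ((PySem.List.slice? s.toList none none 2).getD []).all PySem.Chars.islower &&
  ((PySem.List.slice? s.toList (some 1) none 2).getD []).all PySem.Chars.isupper

-- ===== PRECONDITION & SPEC =====
def Spec_is_easy (s : String) (out : Bool) : Prop := out = is_easy_alt s
instance (s : String) (out : Bool) : Decidable (Spec_is_easy s out) := by unfold Spec_is_easy; infer_instance

-- ===== CLAIM (what is proved, stated in full; the proofs are below) =====
def Claim_equal_is_easy : Prop := ∀ (s : String), Dom_is_easy s → Spec_is_easy s (is_easy s)

-- ===== LEMMAS AND PROOFS =====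

-- the even-index and odd-index subsequences, two elements at a time
def evens : List Char → List Char
  | [] => []
  | [c] => [c]
  | a :: _ :: t => a :: evens t

def odds : List Char → List Char
  | [] => []
  | [_] => []
  | _ :: b :: t => b :: odds t

lemma odds_cons_eq_evens (t : List Char) : ∀ a, odds (a :: t) = evens t := by
  induction t using evens.induct with
  | case1 => intro a; rfl
  | case2 b => intro a; rfl
  | case3 b c t ih => intro a; simp [odds, evens, ih c]

lemma loopA (t : List Char) : ∀ n : Int, n % 2 = 0 →
    isEasyLoop (PySem.List.enumerate t n)
      = ((evens t).all PySem.Chars.islower && (odds t).all PySem.Chars.isupper) := by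
  induction t using evens.induct with
  | case1 => intro n hn; simp [PySem.List.enumerate, isEasyLoop, evens, odds]
  | case2 c =>
    intro n hn
    simp [PySem.List.enumerate, isEasyLoop, evens, odds, hn]
  | case3 a b t ih =>
    intro n hn
    have h0 : (n % 2 == 0) = true := by simp [hn]
    have h1 : ((n + 1) % 2 == 0) = false := by simp; omega
    have h2 : (n + 1 + 1) % 2 = 0 := by omega
    simp only [PySem.List.enumerate_cons, isEasyLoop, h0, h1, if_true, if_false,
      Bool.false_eq_true, ih _ h2]
    simp [evens, odds]
    cases PySem.Chars.islower a <;> cases PySem.Chars.isupper b <;>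
      cases (evens t).all PySem.Chars.islower <;> simp

lemma natCore (xs : List Char) :
    List.filterMap (fun k => xs[2 * k]?) (List.range ((xs.length + 1) / 2)) = evens xs := by
  induction xs using evens.induct with
  | case1 => simp [evens]
  | case2 c => simp [List.range_succ, evens]
  | case3 a b t ih =>
    have hlen : ((a :: b :: t).length + 1) / 2 = (t.length + 1) / 2 + 1 := by
      simp; omega
    rw [hlen, List.range_succ_eq_map, List.filterMap_cons]
    simp only [Nat.mul_zero, List.getElem?_cons_zero, List.filterMap_map]
    have hf : ((fun k => (a :: b :: t)[2 * k]?) ∘ Nat.succ) = fun k => t[2 * k]? := by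
      funext k
      have : 2 * Nat.succ k = (2 * k).succ.succ := by omega
      simp [this]
    rw [hf, ih]
    rfl

lemma sliceEvens (xs : List Char) :
    PySem.List.slice? xs none none 2 = some (evens xs) := by
  rw [PySem.List.slice?, PySem.List.sliceIndices]
  norm_num
  have hc : (if 0 < xs.length then (((xs.length : Int) + 2 - 1) / 2).toNat else 0)
      = (xs.length + 1) / 2 := by
    split <;> omega
  have hf : (fun k : Nat => xs[(2 * (k : Int)).toNat]?) = fun k => xs[2 * k]? := by
    funext k
    have : (2 * (k : Int)).toNat = 2 * k := by omega
    rw [this]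
  rw [hc, hf, natCore]

lemma sliceOdds (xs : List Char) :
    PySem.List.slice? xs (some 1) none 2 = some (odds xs) := by
  cases xs with
  | nil => rfl
  | cons a t =>
    rw [PySem.List.slice?, PySem.List.sliceIndices]
    norm_num
    have hc : (if 0 < t.length then (((t.length : Int) + 2 - 1) / 2).toNat else 0)
        = (t.length + 1) / 2 := by
      split <;> omega
    have hf : (fun k : Nat => (a :: t)[(1 + 2 * (k : Int)).toNat]?) = fun k => t[2 * k]? := by
      funext k
      have h1 : (1 + 2 * (k : Int)).toNat = (2 * k).succ := by omega
      simp [h1]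
    rw [hc, hf, natCore, odds_cons_eq_evens]

-- ===== VERDICT (by name: the statement is the Claim_ definition above) =====
theorem is_easy_spec : Claim_equal_is_easy := by
  intro s _
  unfold Spec_is_easy is_easy is_easy_alt
  rw [sliceEvens, sliceOdds, loopA s.toList 0 rfl]
  rfl
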